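-- pv_equiv track=rewrite | github.com/venkatsai1996/DataStructures | sum_matrix.py | coverageOfMatrix
-- ===== SOURCE A (Python) =====
-- def coverageOfMatrix(mat):
--     # Write your code here.
--     rows = len(mat)
--
--     colums  =len(mat[0])
--     total_sum = 0
--     for i in range(0,rows):
--         for j in range(0,colums):
--             if mat[i][j] == 0:
--                 if i-1 >= 0:
--                     total_sum = total_sum + mat[i-1][j]
--                 if i+1 <= rows -1:
--                     total_sum = total_sum + mat[i+1][j]
--                 if j - 1 >= 0 :
--                     total_sum = total_sum + mat[i][j-1]
--                 if j + 1 <= colums - 1 :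
--                     total_sum = total_sum + mat[i][j+1]
--
--     return total_sum
--
--
--     pass
-- ===== SOURCE B (Python) =====
-- def coverageOfMatrix(mat):
--     cols = len(mat[0])
--     total = 0
--     # horizontal adjacencies: each adjacent pair contributes partner values per zero
--     for row in mat:
--         r = row[:cols]
--         for a, b in zip(r, r[1:]):
--             if a == 0:
--                 total += b
--             if b == 0:
--                 total += a
--     # vertical adjacencies
--     for up, down in zip(mat, mat[1:]):
--         for a, b in zip(up[:cols], down[:cols]):
--             if a == 0:
--                 total += b
--             if b == 0:
--                 total += a
--     return total
-- ===== Notes on version B (the rewrite author's own statement) =====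
-- stated objective: alternative
-- what changed: Replaces A's per-cell index loops (each zero cell pulls its in-range neighbors' values) by two edge passes: zip each clipped row with its shift for horizontal adjacencies and zip the matrix with its shift for vertical ones, each adjacent pair donating its partner's value per zero endpoint; a proved double-counting identity over the grid shows the totals coincide.
import Mathlib
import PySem

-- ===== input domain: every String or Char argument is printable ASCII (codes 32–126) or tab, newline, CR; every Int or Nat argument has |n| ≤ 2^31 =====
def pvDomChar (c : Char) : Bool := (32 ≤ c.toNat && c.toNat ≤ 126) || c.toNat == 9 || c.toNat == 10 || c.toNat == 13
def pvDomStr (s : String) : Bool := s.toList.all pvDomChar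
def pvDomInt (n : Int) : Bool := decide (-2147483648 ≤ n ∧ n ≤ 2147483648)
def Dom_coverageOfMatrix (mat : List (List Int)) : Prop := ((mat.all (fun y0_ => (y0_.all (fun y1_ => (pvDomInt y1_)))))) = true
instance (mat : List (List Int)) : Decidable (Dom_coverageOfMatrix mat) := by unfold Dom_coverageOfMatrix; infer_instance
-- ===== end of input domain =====

-- B sums over the grid's adjacency EDGES (zips of slices, one horizontal and one vertical pass)
-- instead of A's per-cell index loops pulling neighbors of zero cells; same cost, proved equal
-- by a double-counting identity over the grid.

-- ===== PORT A =====
-- zero cells pull their in-range orthogonal neighbors' values into the total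
def coverageOfMatrix (mat : List (List Int)) : Int :=
  let rows : Int := PySem.List.len mat
  let colums : Int := PySem.List.len (PySem.List.pyGetD mat 0 [])
  (PySem.List.pyRange 0 rows 1).foldl (fun total_sum i =>
    (PySem.List.pyRange 0 colums 1).foldl (fun total_sum j =>
      if PySem.List.pyGetD (PySem.List.pyGetD mat i []) j 0 = 0 then
        let t1 := if i - 1 ≥ 0 then total_sum + PySem.List.pyGetD (PySem.List.pyGetD mat (i-1) []) j 0 else total_sum
        let t2 := if i + 1 ≤ rows - 1 then t1 + PySem.List.pyGetD (PySem.List.pyGetD mat (i+1) []) j 0 else t1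
        let t3 := if j - 1 ≥ 0 then t2 + PySem.List.pyGetD (PySem.List.pyGetD mat i []) (j-1) 0 else t2
        let t4 := if j + 1 ≤ colums - 1 then t3 + PySem.List.pyGetD (PySem.List.pyGetD mat i []) (j+1) 0 else t3
        t4
      else total_sum) total_sum) 0

-- ===== PORT B =====
-- two passes over adjacency edges: zip each (clipped) row with its shift for horizontal pairs,
-- zip the matrix with its shift for vertical pairs; each pair donates partner values per zero
def coverageOfMatrix_alt (mat : List (List Int)) : Int :=
  let cols : Int := PySem.List.len (PySem.List.pyGetD mat 0 [])
  let horiz : Int := mat.foldl (fun total row =>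
    let r := PySem.List.slice row none (some cols)
    (r.zip (PySem.List.slice r (some 1) none)).foldl (fun t ab =>
      let t1 := if ab.1 = 0 then t + ab.2 else t
      if ab.2 = 0 then t1 + ab.1 else t1) total) 0
  (mat.zip (PySem.List.slice mat (some 1) none)).foldl (fun total ud =>
    ((PySem.List.slice ud.1 none (some cols)).zip (PySem.List.slice ud.2 none (some cols))).foldl (fun t ab =>
      let t1 := if ab.1 = 0 then t + ab.2 else t
      if ab.2 = 0 then t1 + ab.1 else t1) total) horiz

-- ===== PRECONDITION & SPEC =====
-- Pre_ excludes exactly the inputs on which the Python A raises (IndexError): the empty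
-- matrix (mat[0]) and matrices with a row shorter than the first row (mat[i][j], j < len(mat[0])).
def Pre_coverageOfMatrix (mat : List (List Int)) : Prop :=
  mat ≠ [] ∧ ∀ row ∈ mat, (mat.headD []).length ≤ row.length
instance (mat : List (List Int)) : Decidable (Pre_coverageOfMatrix mat) := by
  unfold Pre_coverageOfMatrix; infer_instance
def pvWitness_coverageOfMatrix : List (List Int) := [[0, 1], [2, 3]]
def Spec_coverageOfMatrix (mat : List (List Int)) (out : Int) : Prop := out = coverageOfMatrix_alt mat
instance (mat : List (List Int)) (out : Int) : Decidable (Spec_coverageOfMatrix mat out) := by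
  unfold Spec_coverageOfMatrix; infer_instance

-- ===== CLAIM (what is proved, stated in full; the proofs are below) =====
def Claim_equal_coverageOfMatrix : Prop := ∀ (mat : List (List Int)), Dom_coverageOfMatrix mat → Pre_coverageOfMatrix mat → Spec_coverageOfMatrix mat (coverageOfMatrix mat)

-- ===== LEMMAS AND PROOFS =====

-- the value of cell (i, j) seen through Nat indices (0 outside the matrix)
def pvVal (mat : List (List Int)) (i j : Nat) : Int := (mat.getD i []).getD j 0

-- what one adjacency edge (a, b) contributes: each endpoint's value once per zero partner
def pvEdge (a b : Int) : Int := (if a = 0 then b else 0) + (if b = 0 then a else 0)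

-- A's contribution of cell (i, j) to the total, Int-indexed (as in the port)
def pvTermAInt (mat : List (List Int)) (rows colums i j : Int) : Int :=
  if PySem.List.pyGetD (PySem.List.pyGetD mat i []) j 0 = 0 then
    (if i - 1 ≥ 0 then PySem.List.pyGetD (PySem.List.pyGetD mat (i-1) []) j 0 else 0)
    + (if i + 1 ≤ rows - 1 then PySem.List.pyGetD (PySem.List.pyGetD mat (i+1) []) j 0 else 0)
    + (if j - 1 ≥ 0 then PySem.List.pyGetD (PySem.List.pyGetD mat i []) (j-1) 0 else 0)
    + (if j + 1 ≤ colums - 1 then PySem.List.pyGetD (PySem.List.pyGetD mat i []) (j+1) 0 else 0)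
  else 0

-- A's contribution of cell (i, j), Nat-indexed
def pvTermA (mat : List (List Int)) (R C i j : Nat) : Int :=
  if pvVal mat i j = 0 then
    (if 1 ≤ i then pvVal mat (i-1) j else 0) + (if i+1 < R then pvVal mat (i+1) j else 0)
    + (if 1 ≤ j then pvVal mat i (j-1) else 0) + (if j+1 < C then pvVal mat i (j+1) else 0)
  else 0

-- the (i, j)-indexed double sum over the R × C grid
def pvGrid (R C : Nat) (f : Nat → Nat → Int) : Int :=
  ((List.range R).map (fun i => ((List.range C).map (fun j => f i j)).sum)).sum

-- a fold that only adds a per-element amount is the initial value plus the sum of the amounts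
theorem pv_foldl_shift {α : Type} (l : List α) (f : Int → α → Int) (g : α → Int)
    (h : ∀ acc x, f acc x = acc + g x) (init : Int) :
    l.foldl f init = init + (l.map g).sum := by
  induction l generalizing init with
  | nil => simp
  | cons x t ih => simp [h, ih (init + g x), add_assoc]

-- 'mat[0]' as the ports read it is the head row
theorem pv_head (mat : List (List Int)) : PySem.List.pyGetD mat 0 [] = mat.headD [] := by
  rw [PySem.List.pyGetD_ofNat' mat 0 []]
  cases mat <;> simp

-- port A evaluates to the double sum of its Int-indexed per-cell terms
theorem pv_portA_int (mat : List (List Int)) :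
    coverageOfMatrix mat
      = ((PySem.List.pyRange 0 (PySem.List.len mat) 1).map (fun i =>
          ((PySem.List.pyRange 0 (PySem.List.len (PySem.List.pyGetD mat 0 [])) 1).map (fun j =>
            pvTermAInt mat (PySem.List.len mat) (PySem.List.len (PySem.List.pyGetD mat 0 [])) i j)).sum)).sum := by
  refine (pv_foldl_shift _ _ _ ?_ 0).trans (zero_add _)
  intro acc i
  refine pv_foldl_shift _ _ _ ?_ acc
  intro acc j
  unfold pvTermAInt
  dsimp only
  split_ifs <;> ring

-- the Int-indexed term at cast Nat indices is the Nat-indexed term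
theorem pv_cast_mid (mat : List (List Int)) (k j : Nat) :
    PySem.List.pyGetD (PySem.List.pyGetD mat (k : Int) []) (j : Int) 0 = (mat.getD k []).getD j 0 := by
  rw [PySem.List.pyGetD_natCast, PySem.List.pyGetD_natCast]

theorem pv_cast_up (mat : List (List Int)) (k j : Nat) (f : Int → Int) (g : Int) :
    (if (k : Int) - 1 ≥ 0 then f (PySem.List.pyGetD (PySem.List.pyGetD mat ((k : Int) - 1) []) (j : Int) 0) else g)
      = (if 1 ≤ k then f ((mat.getD (k-1) []).getD j 0) else g) := by
  by_cases h : 1 ≤ k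
  · have e : (k : Int) - 1 = ((k - 1 : Nat) : Int) := by omega
    rw [e, PySem.List.pyGetD_natCast, PySem.List.pyGetD_natCast, if_pos h,
      if_pos (by positivity : ((k - 1 : Nat) : Int) ≥ 0)]
  · have e : k = 0 := by omega
    subst e; norm_num

theorem pv_cast_down (mat : List (List Int)) (R : Nat) (k j : Nat) (f : Int → Int) (g : Int) :
    (if (k : Int) + 1 ≤ (R : Int) - 1 then f (PySem.List.pyGetD (PySem.List.pyGetD mat ((k : Int) + 1) []) (j : Int) 0) else g)
      = (if k + 1 < R then f ((mat.getD (k+1) []).getD j 0) else g) := by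
  have e : (k : Int) + 1 = ((k + 1 : Nat) : Int) := by omega
  have c : ((k + 1 : Nat) : Int) ≤ (R : Int) - 1 ↔ k + 1 < R := by omega
  rw [e, PySem.List.pyGetD_natCast, PySem.List.pyGetD_natCast]
  exact if_congr c rfl rfl

theorem pv_cast_left (mat : List (List Int)) (k j : Nat) (f : Int → Int) (g : Int) :
    (if (j : Int) - 1 ≥ 0 then f (PySem.List.pyGetD (PySem.List.pyGetD mat (k : Int) []) ((j : Int) - 1) 0) else g)
      = (if 1 ≤ j then f ((mat.getD k []).getD (j-1) 0) else g) := by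
  by_cases h : 1 ≤ j
  · have e : (j : Int) - 1 = ((j - 1 : Nat) : Int) := by omega
    rw [e, PySem.List.pyGetD_natCast, PySem.List.pyGetD_natCast, if_pos h,
      if_pos (by positivity : ((j - 1 : Nat) : Int) ≥ 0)]
  · have e : j = 0 := by omega
    subst e; norm_num

theorem pv_cast_right (mat : List (List Int)) (C : Nat) (k j : Nat) (f : Int → Int) (g : Int) :
    (if (j : Int) + 1 ≤ (C : Int) - 1 then f (PySem.List.pyGetD (PySem.List.pyGetD mat (k : Int) []) ((j : Int) + 1) 0) else g)
      = (if j + 1 < C then f ((mat.getD k []).getD (j+1) 0) else g) := by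
  have e : (j : Int) + 1 = ((j + 1 : Nat) : Int) := by omega
  have c : ((j + 1 : Nat) : Int) ≤ (C : Int) - 1 ↔ j + 1 < C := by omega
  rw [e, PySem.List.pyGetD_natCast, PySem.List.pyGetD_natCast]
  exact if_congr c rfl rfl

theorem pv_castA (mat : List (List Int)) (R C k j : Nat) :
    pvTermAInt mat (R : Int) (C : Int) (k : Int) (j : Int) = pvTermA mat R C k j := by
  unfold pvTermAInt pvTermA pvVal
  rw [pv_cast_mid, pv_cast_up mat k j (fun x => x) 0, pv_cast_down mat R k j (fun x => x) 0,
    pv_cast_left mat k j (fun x => x) 0, pv_cast_right mat C k j (fun x => x) 0]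

-- sum over range n of a term guarded by 1 ≤ i, shifted down, equals the same sum guarded by i+1 < n
theorem pv_sum_shift (n : Nat) (g : Nat → Int) :
    ((List.range n).map (fun i => if 1 ≤ i then g (i-1) else 0)).sum
      = ((List.range n).map (fun i => if i+1 < n then g i else 0)).sum := by
  cases n with
  | zero => simp
  | succ m =>
    have hl : ((List.range (m+1)).map (fun i => if 1 ≤ i then g (i-1) else 0)).sum
        = ((List.range m).map g).sum := by
      rw [List.range_succ_eq_map]
      simp [List.map_map, Function.comp_def]
    have hr : ((List.range (m+1)).map (fun i => if i+1 < m+1 then g i else 0)).sum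
        = ((List.range m).map g).sum := by
      rw [List.range_succ, List.map_append, List.sum_append]
      have h1 : (List.range m).map (fun i => if i+1 < m+1 then g i else 0) = (List.range m).map g :=
        List.map_congr_left (fun a ha => if_pos (Nat.succ_lt_succ (List.mem_range.mp ha)))
      rw [h1]; simp
    rw [hl, hr]

-- dropping a guard 'j+1 < n' shortens the range by one
theorem pv_sum_guard (n : Nat) (g : Nat → Int) :
    ((List.range n).map (fun j => if j+1 < n then g j else 0)).sum
      = ((List.range (n-1)).map g).sum := by
  cases n with
  | zero => simp
  | succ m =>
    rw [List.range_succ, List.map_append, List.sum_append]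
    have h1 : (List.range m).map (fun j => if j+1 < m+1 then g j else 0) = (List.range m).map g :=
      List.map_congr_left (fun a ha => if_pos (Nat.succ_lt_succ (List.mem_range.mp ha)))
    rw [h1]; simp

-- a guard independent of the summation variable pulls out of the sum
theorem pv_ite_sum (C : Nat) (c : Prop) [Decidable c] (t : Nat → Int) :
    ((List.range C).map (fun j => if c then t j else 0)).sum
      = if c then ((List.range C).map t).sum else 0 := by
  split_ifs <;> simp

-- the double sum is additive in the per-cell term
theorem pv_grid_add (R C : Nat) (f g : Nat → Nat → Int) :
    pvGrid R C (fun i j => f i j + g i j) = pvGrid R C f + pvGrid R C g := by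
  unfold pvGrid
  calc ((List.range R).map (fun i => ((List.range C).map (fun j => f i j + g i j)).sum)).sum
      = ((List.range R).map (fun i => ((List.range C).map (fun j => f i j)).sum
          + ((List.range C).map (fun j => g i j)).sum)).sum := by
        apply congrArg; apply List.map_congr_left; intro i _
        exact PySem.List.sum_map_add_int _ _ _
    _ = _ := PySem.List.sum_map_add_int _ _ _

-- pointwise congruence for the double sum
theorem pv_grid_congr (R C : Nat) (f g : Nat → Nat → Int) (h : ∀ i j, f i j = g i j) :
    pvGrid R C f = pvGrid R C g := by
  unfold pvGrid
  apply congrArg; apply List.map_congr_left; intro i _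
  apply congrArg; apply List.map_congr_left; intro j _
  exact h i j

-- vertical double counting: zero cells pulling the value above = cells pushing to a zero below
theorem pv_shift_i (R C : Nat) (w : Nat → Nat → Int) :
    pvGrid R C (fun i j => if 1 ≤ i then w (i-1) j else 0)
      = pvGrid R C (fun i j => if i+1 < R then w i j else 0) := by
  unfold pvGrid
  calc ((List.range R).map (fun i => ((List.range C).map (fun j => if 1 ≤ i then w (i-1) j else 0)).sum)).sum
      = ((List.range R).map (fun i => if 1 ≤ i then ((List.range C).map (fun j => w (i-1) j)).sum else 0)).sum := by
        apply congrArg; apply List.map_congr_left; intro i _; exact pv_ite_sum C _ _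
    _ = ((List.range R).map (fun i => if i+1 < R then ((List.range C).map (fun j => w i j)).sum else 0)).sum :=
        pv_sum_shift R (fun i => ((List.range C).map (fun j => w i j)).sum)
    _ = _ := by
        apply congrArg; apply List.map_congr_left; intro i _; exact (pv_ite_sum C _ _).symm

-- horizontal double counting, per row
theorem pv_shift_j (R C : Nat) (w : Nat → Nat → Int) :
    pvGrid R C (fun i j => if 1 ≤ j then w i (j-1) else 0)
      = pvGrid R C (fun i j => if j+1 < C then w i j else 0) := by
  unfold pvGrid
  apply congrArg; apply List.map_congr_left; intro i _
  exact pv_sum_shift C (fun j => w i j)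

-- A's total is the edge sum: every in-range adjacency contributes pvEdge of its endpoints
theorem pv_A_edges (mat : List (List Int)) (R C : Nat) :
    pvGrid R C (pvTermA mat R C)
      = pvGrid R C (fun i j => if j+1 < C then pvEdge (pvVal mat i j) (pvVal mat i (j+1)) else 0)
        + pvGrid R C (fun i j => if i+1 < R then pvEdge (pvVal mat i j) (pvVal mat (i+1) j) else 0) := by
  have e1 : pvGrid R C (pvTermA mat R C)
      = (pvGrid R C (fun i j => if 1 ≤ i then (if pvVal mat i j = 0 then pvVal mat (i-1) j else 0) else 0)
        + pvGrid R C (fun i j => if i+1 < R then (if pvVal mat i j = 0 then pvVal mat (i+1) j else 0) else 0))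
        + (pvGrid R C (fun i j => if 1 ≤ j then (if pvVal mat i j = 0 then pvVal mat i (j-1) else 0) else 0)
        + pvGrid R C (fun i j => if j+1 < C then (if pvVal mat i j = 0 then pvVal mat i (j+1) else 0) else 0)) := by
    rw [← pv_grid_add, ← pv_grid_add, ← pv_grid_add]
    exact pv_grid_congr _ _ _ _ (fun i j => by unfold pvTermA; split_ifs <;> ring)
  have h1 : pvGrid R C (fun i j => if 1 ≤ i then (if pvVal mat i j = 0 then pvVal mat (i-1) j else 0) else 0)
      = pvGrid R C (fun i j => if i+1 < R then (if pvVal mat (i+1) j = 0 then pvVal mat i j else 0) else 0) :=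
    (pv_grid_congr R C _ _ (fun i j => by
        by_cases h : 1 ≤ i
        · simp only [if_pos h, Nat.sub_add_cancel h]
        · simp only [if_neg h])).trans
      (pv_shift_i R C (fun a b => if pvVal mat (a+1) b = 0 then pvVal mat a b else 0))
  have h3 : pvGrid R C (fun i j => if 1 ≤ j then (if pvVal mat i j = 0 then pvVal mat i (j-1) else 0) else 0)
      = pvGrid R C (fun i j => if j+1 < C then (if pvVal mat i (j+1) = 0 then pvVal mat i j else 0) else 0) :=
    (pv_grid_congr R C _ _ (fun i j => by
        by_cases h : 1 ≤ j
        · simp only [if_pos h, Nat.sub_add_cancel h]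
        · simp only [if_neg h])).trans
      (pv_shift_j R C (fun a b => if pvVal mat a (b+1) = 0 then pvVal mat a b else 0))
  have hv : pvGrid R C (fun i j => if i+1 < R then (if pvVal mat (i+1) j = 0 then pvVal mat i j else 0) else 0)
      + pvGrid R C (fun i j => if i+1 < R then (if pvVal mat i j = 0 then pvVal mat (i+1) j else 0) else 0)
      = pvGrid R C (fun i j => if i+1 < R then pvEdge (pvVal mat i j) (pvVal mat (i+1) j) else 0) := by
    rw [← pv_grid_add]
    exact pv_grid_congr _ _ _ _ (fun i j => by unfold pvEdge; split_ifs <;> ring)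
  have hh : pvGrid R C (fun i j => if j+1 < C then (if pvVal mat i (j+1) = 0 then pvVal mat i j else 0) else 0)
      + pvGrid R C (fun i j => if j+1 < C then (if pvVal mat i j = 0 then pvVal mat i (j+1) else 0) else 0)
      = pvGrid R C (fun i j => if j+1 < C then pvEdge (pvVal mat i j) (pvVal mat i (j+1)) else 0) := by
    rw [← pv_grid_add]
    exact pv_grid_congr _ _ _ _ (fun i j => by unfold pvEdge; split_ifs <;> ring)
  rw [e1, h1, h3, ← hv, ← hh]
  ring

-- a double sum over pyRanges of an Int-indexed term is the pvGrid of the Nat-indexed term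
theorem pv_to_grid (R C : Nat) (F : Int → Int → Int) (f : Nat → Nat → Int)
    (h : ∀ i j : Nat, F (i : Int) (j : Int) = f i j) :
    ((PySem.List.pyRange 0 (R : Int) 1).map (fun i =>
        ((PySem.List.pyRange 0 (C : Int) 1).map (fun j => F i j)).sum)).sum
      = pvGrid R C f := by
  unfold pvGrid
  simp only [PySem.List.pyRange_zero_natCast, List.map_map, Function.comp_def]
  apply congrArg; apply List.map_congr_left; intro i _
  apply congrArg; apply List.map_congr_left; intro j _
  exact h i j

-- a zip-sum is the index sum up to the shorter length
theorem pv_zipsum {α β : Type} (u : List α) (v : List β) (da : α) (db : β) (f : α × β → Int) :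
    ((u.zip v).map f).sum
      = ((List.range (min u.length v.length)).map (fun j => f (u.getD j da, v.getD j db))).sum := by
  induction u generalizing v with
  | nil => simp
  | cons a u' ih =>
    cases v with
    | nil => simp
    | cons b v' =>
      simp only [List.zip_cons_cons, List.map_cons, List.sum_cons, List.length_cons,
        Nat.succ_min_succ, List.range_succ_eq_map, List.map_map, Function.comp_def, List.getD_cons_zero,
        List.getD_cons_succ]
      rw [ih v']

-- a list sum is the index sum over its range
theorem pv_listsum_index {α : Type} (l : List α) (d : α) (g : α → Int) :
    (l.map g).sum = ((List.range l.length).map (fun i => g (l.getD i d))).sum := by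
  induction l with
  | nil => simp
  | cons a t ih =>
    simp only [List.map_cons, List.sum_cons, List.length_cons, List.range_succ_eq_map,
      List.map_map, Function.comp_def, List.getD_cons_zero, List.getD_cons_succ]
    rw [ih]

-- getD through tail and take
theorem pv_getD_tail {α : Type} (l : List α) (j : Nat) (d : α) :
    l.tail.getD j d = l.getD (j+1) d := by
  cases l <;> simp [List.getD]

theorem pv_getD_take {α : Type} (l : List α) (C j : Nat) (h : j < C) (d : α) :
    (l.take C).getD j d = l.getD j d := by
  simp [List.getD, h]

-- inner fold step of B adds exactly one edge contribution
theorem pv_pair_step (t : Int) (ab : Int × Int) :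
    (let t1 := if ab.1 = 0 then t + ab.2 else t
     if ab.2 = 0 then t1 + ab.1 else t1) = t + pvEdge ab.1 ab.2 := by
  unfold pvEdge; dsimp only; split_ifs <;> ring

-- B's horizontal pass on one (clipped) row, as an index sum
theorem pv_rowH (row : List Int) (C : Nat) (h : C ≤ row.length) :
    (((row.take C).zip (row.take C).tail).map (fun ab => pvEdge ab.1 ab.2)).sum
      = ((List.range C).map (fun j => if j+1 < C then pvEdge (row.getD j 0) (row.getD (j+1) 0) else 0)).sum := by
  rw [pv_zipsum (row.take C) (row.take C).tail 0 0 (fun ab => pvEdge ab.1 ab.2),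
    pv_sum_guard C (fun j => pvEdge (row.getD j 0) (row.getD (j+1) 0))]
  have hmin : min (row.take C).length (row.take C).tail.length = C - 1 := by
    rw [List.length_tail, List.length_take]; omega
  rw [hmin]
  apply congrArg; apply List.map_congr_left; intro j hj
  have hj' : j < C - 1 := List.mem_range.mp hj
  dsimp only
  rw [pv_getD_tail, pv_getD_take row C j (by omega) 0, pv_getD_take row C (j+1) (by omega) 0]

-- B's vertical pass on one row pair, as an index sum
theorem pv_pairV (u v : List Int) (C : Nat) (hu : C ≤ u.length) (hv : C ≤ v.length) :
    (((u.take C).zip (v.take C)).map (fun ab => pvEdge ab.1 ab.2)).sum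
      = ((List.range C).map (fun j => pvEdge (u.getD j 0) (v.getD j 0))).sum := by
  rw [pv_zipsum (u.take C) (v.take C) 0 0 (fun ab => pvEdge ab.1 ab.2)]
  have hmin : min (u.take C).length (v.take C).length = C := by
    rw [List.length_take, List.length_take]; omega
  rw [hmin]
  apply congrArg; apply List.map_congr_left; intro j hj
  have hj' : j < C := List.mem_range.mp hj
  dsimp only
  rw [pv_getD_take u C j hj' 0, pv_getD_take v C j hj' 0]

-- port B evaluates to horizontal edge sum + vertical edge sum over the grid
theorem pv_portB (mat : List (List Int)) (C : Nat) (hC : C = (mat.headD []).length)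
    (hPre : ∀ row ∈ mat, C ≤ row.length) :
    coverageOfMatrix_alt mat
      = pvGrid mat.length C (fun i j => if j+1 < C then pvEdge (pvVal mat i j) (pvVal mat i (j+1)) else 0)
        + pvGrid mat.length C (fun i j => if i+1 < mat.length then pvEdge (pvVal mat i j) (pvVal mat (i+1) j) else 0) := by
  have hfold : coverageOfMatrix_alt mat
      = (mat.map (fun row => (((row.take C).zip (row.take C).tail).map (fun ab => pvEdge ab.1 ab.2)).sum)).sum
        + ((mat.zip mat.tail).map (fun ud => (((ud.1.take C).zip (ud.2.take C)).map (fun ab => pvEdge ab.1 ab.2)).sum)).sum := by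
    simp only [coverageOfMatrix_alt, pv_head, PySem.List.len_eq, ← hC,
      PySem.List.slice_to_natCast, PySem.List.slice_from_one]
    rw [pv_foldl_shift (mat.zip mat.tail) _
          (fun ud => (((ud.1.take C).zip (ud.2.take C)).map (fun ab => pvEdge ab.1 ab.2)).sum)
          (fun acc ud => pv_foldl_shift _ _ _ (fun t ab => pv_pair_step t ab) acc),
        pv_foldl_shift mat _
          (fun row => (((row.take C).zip (row.take C).tail).map (fun ab => pvEdge ab.1 ab.2)).sum)
          (fun acc row => pv_foldl_shift _ _ _ (fun t ab => pv_pair_step t ab) acc) 0,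
        zero_add]
  have hH : (mat.map (fun row => (((row.take C).zip (row.take C).tail).map (fun ab => pvEdge ab.1 ab.2)).sum)).sum
      = pvGrid mat.length C (fun i j => if j+1 < C then pvEdge (pvVal mat i j) (pvVal mat i (j+1)) else 0) := by
    rw [pv_listsum_index mat ([] : List Int)]
    unfold pvGrid
    apply congrArg; apply List.map_congr_left; intro i hi
    have hi' : i < mat.length := List.mem_range.mp hi
    have hmem : mat.getD i [] ∈ mat := by
      rw [List.getD_eq_getElem mat [] hi']; exact List.getElem_mem hi'
    rw [pv_rowH (mat.getD i []) C (hPre _ hmem)]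
    simp only [pvVal]
  have hRHS : pvGrid mat.length C (fun i j => if i+1 < mat.length then pvEdge (pvVal mat i j) (pvVal mat (i+1) j) else 0)
      = ((List.range (mat.length - 1)).map (fun i =>
          ((List.range C).map (fun j => pvEdge (pvVal mat i j) (pvVal mat (i+1) j))).sum)).sum := by
    unfold pvGrid
    rw [← pv_sum_guard mat.length (fun i => ((List.range C).map (fun j => pvEdge (pvVal mat i j) (pvVal mat (i+1) j))).sum)]
    apply congrArg; apply List.map_congr_left; intro i _
    exact pv_ite_sum C _ _
  have hV : ((mat.zip mat.tail).map (fun ud => (((ud.1.take C).zip (ud.2.take C)).map (fun ab => pvEdge ab.1 ab.2)).sum)).sum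
      = pvGrid mat.length C (fun i j => if i+1 < mat.length then pvEdge (pvVal mat i j) (pvVal mat (i+1) j) else 0) := by
    rw [pv_zipsum mat mat.tail [] []
        (fun ud => (((ud.1.take C).zip (ud.2.take C)).map (fun ab => pvEdge ab.1 ab.2)).sum), hRHS]
    have hmin : min mat.length mat.tail.length = mat.length - 1 := by
      rw [List.length_tail]; omega
    rw [hmin]
    apply congrArg; apply List.map_congr_left; intro i hi
    have hi' : i < mat.length - 1 := List.mem_range.mp hi
    dsimp only
    rw [pv_getD_tail]
    have m1 : mat.getD i [] ∈ mat := by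
      rw [List.getD_eq_getElem mat [] (by omega : i < mat.length)]; exact List.getElem_mem _
    have m2 : mat.getD (i+1) [] ∈ mat := by
      rw [List.getD_eq_getElem mat [] (by omega : i + 1 < mat.length)]; exact List.getElem_mem _
    rw [pv_pairV _ _ C (hPre _ m1) (hPre _ m2)]
    simp only [pvVal]
  rw [hfold, hH, hV]

-- ===== VERDICT (by name: the statement is the Claim_ definition above) =====
theorem coverageOfMatrix_spec : Claim_equal_coverageOfMatrix := by
  intro mat _ hPre
  unfold Spec_coverageOfMatrix
  obtain ⟨-, hrows⟩ := hPre
  have hR : PySem.List.len mat = ((mat.length : Nat) : Int) := PySem.List.len_eq mat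
  have hC : PySem.List.len (PySem.List.pyGetD mat 0 [])
      = (((mat.headD []).length : Nat) : Int) := by rw [pv_head]; exact PySem.List.len_eq _
  rw [pv_portA_int, hR, hC]
  rw [pv_to_grid mat.length (mat.headD []).length _ (pvTermA mat mat.length (mat.headD []).length)
        (fun i j => pv_castA mat mat.length (mat.headD []).length i j)]
  rw [pv_A_edges mat mat.length (mat.headD []).length]
  exact (pv_portB mat (mat.headD []).length rfl hrows).symm
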